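-- pv_equiv track=rewrite | github.com/Tomixbo/mangaka | mangaka/read_manga/utils.py | sort_texts_in_panel
-- ===== SOURCE A (Python) =====
-- def sort_texts_in_panel(texts, horizontal_threshold=50):
--     """
--     Sort texts within a panel for manga-style reading:
--     - Group texts by columns (sorted from right to left).
--     - Sort texts within each column from top to bottom.
--     """
--     if not texts:
--         return []
--
--     # Sort texts by x_min (from right to left)
--     texts.sort(key=lambda t: t[0], reverse=True)
--
--     grouped_columns = []
--     current_column = [texts[0]]
--
--     # Group texts into columns
--     for i in range(1, len(texts)):
--         prev_text = current_column[-1]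
--         current_text = texts[i]
--
--         # Check if the current text belongs to the same column
--         if abs(current_text[0] - prev_text[0]) <= horizontal_threshold:
--             current_column.append(current_text)
--         else:
--             grouped_columns.append(current_column)
--             current_column = [current_text]
--
--     # Add the last column
--     if current_column:
--         grouped_columns.append(current_column)
--
--     # Sort each column top to bottom by y_min
--     for column in grouped_columns:
--         column.sort(key=lambda t: t[1])
--
--     # Flatten the columns into a single sorted list
--     sorted_texts = [text for column in grouped_columns for text in column]
--
--     return sorted_texts
-- ===== SOURCE B (Python) =====
-- def sort_texts_in_panel(texts, horizontal_threshold=50):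
--     """Right-to-left column order via a single composite-key sort:
--     label each text with its column index in one pass, then one stable
--     sort on (column, y_min) replaces per-column sorting + flattening."""
--     if not texts:
--         return []
--     texts.sort(key=lambda t: t[0], reverse=True)
--     labeled = []
--     col = 0
--     prev = None
--     for t in texts:
--         if prev is not None and abs(t[0] - prev[0]) > horizontal_threshold:
--             col += 1
--         labeled.append((col, t))
--         prev = t
--     labeled.sort(key=lambda p: (p[0], p[1][1]))
--     return [t for _, t in labeled]
-- ===== Notes on version B (the rewrite author's own statement) =====
-- stated objective: alternative
-- what changed: Replaces group-into-column-sublists, sort each column, flatten with a single pass that labels every text with its column index followed by ONE stable composite-key sort on (column, y_min).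
import Mathlib
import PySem

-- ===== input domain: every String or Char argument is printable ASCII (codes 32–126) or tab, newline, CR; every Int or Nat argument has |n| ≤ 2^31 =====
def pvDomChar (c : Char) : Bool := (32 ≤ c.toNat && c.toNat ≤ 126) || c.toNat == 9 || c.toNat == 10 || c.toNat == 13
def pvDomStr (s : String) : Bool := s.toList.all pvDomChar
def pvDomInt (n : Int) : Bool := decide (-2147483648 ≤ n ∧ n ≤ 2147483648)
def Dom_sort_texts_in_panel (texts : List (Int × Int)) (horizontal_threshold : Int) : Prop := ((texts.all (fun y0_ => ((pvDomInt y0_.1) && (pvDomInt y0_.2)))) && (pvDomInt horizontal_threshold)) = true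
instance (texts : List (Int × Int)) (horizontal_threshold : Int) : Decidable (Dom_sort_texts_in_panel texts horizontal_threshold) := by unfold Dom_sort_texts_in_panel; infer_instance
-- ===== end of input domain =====

-- B replaces A's group-into-sublists / per-column sorts / flatten by a one-pass column
-- labeling followed by a single stable composite-key sort (alternative decomposition, same
-- return value); both A and B sort the `texts` argument in place identically (equivalence
-- proved here is about the return value).

-- ===== PORT A =====
-- one foldl step of A's grouping loop (body of `for i in range(1, len(texts))`)
def pvStepA (horizontal_threshold : Int)
    (acc : List (List (Int × Int)) × List (Int × Int)) (current_text : Int × Int) :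
    List (List (Int × Int)) × List (Int × Int) :=
  let prev_text := PySem.List.pyGetD acc.2 (-1) (0, 0)
  if |current_text.1 - prev_text.1| ≤ horizontal_threshold then
    (acc.1, acc.2 ++ [current_text])
  else
    (acc.1 ++ [acc.2], [current_text])

def sort_texts_in_panel (texts : List (Int × Int)) (horizontal_threshold : Int) : List (Int × Int) :=
  if texts = [] then []
  else
    let s := PySem.List.sorted texts (fun t => t.1) true
    let r := (PySem.List.pyRange 1 (PySem.List.len s)).foldl
      (fun acc j => pvStepA horizontal_threshold acc (PySem.List.pyGetD s j (0, 0)))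
      ([], [PySem.List.pyGetD s 0 (0, 0)])
    let grouped_columns := if r.2 ≠ [] then r.1 ++ [r.2] else r.1
    (grouped_columns.map (fun column => PySem.List.sorted column (fun t => t.2) false)).flatten

-- ===== PORT B =====
-- one foldl step of B's labeling loop (body of `for t in texts`)
def pvStepB (horizontal_threshold : Int)
    (acc : List (Int × (Int × Int)) × Int × Option (Int × Int)) (t : Int × Int) :
    List (Int × (Int × Int)) × Int × Option (Int × Int) :=
  let col := match acc.2.2 with
    | some prev => if |t.1 - prev.1| > horizontal_threshold then acc.2.1 + 1 else acc.2.1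
    | none => acc.2.1
  (acc.1 ++ [(col, t)], col, some t)

def sort_texts_in_panel_alt (texts : List (Int × Int)) (horizontal_threshold : Int) : List (Int × Int) :=
  if texts = [] then []
  else
    let s := PySem.List.sorted texts (fun t => t.1) true
    let labeled := (s.foldl (pvStepB horizontal_threshold) ([], 0, none)).1
    (PySem.List.sorted2 labeled (fun p => p.1) (fun p => p.2.2) false).map (fun p => p.2)

-- ===== PRECONDITION & SPEC =====
def Spec_sort_texts_in_panel (texts : List (Int × Int)) (horizontal_threshold : Int) (out : List (Int × Int)) : Prop := out = sort_texts_in_panel_alt texts horizontal_threshold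
instance (texts : List (Int × Int)) (horizontal_threshold : Int) (out : List (Int × Int)) : Decidable (Spec_sort_texts_in_panel texts horizontal_threshold out) := by unfold Spec_sort_texts_in_panel; infer_instance

-- ===== CLAIM (what is proved, stated in full; the proofs are below) =====
def Claim_equal_sort_texts_in_panel : Prop := ∀ (texts : List (Int × Int)) (horizontal_threshold : Int), Dom_sort_texts_in_panel texts horizontal_threshold → Spec_sort_texts_in_panel texts horizontal_threshold (sort_texts_in_panel texts horizontal_threshold)

-- ===== LEMMAS AND PROOFS =====

-- the column grouping of the sequence a :: l (first column starts with a)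
def pvGrp (th : Int) (a : Int × Int) : List (Int × Int) → List (List (Int × Int))
  | [] => [[a]]
  | b :: r =>
    if |b.1 - a.1| ≤ th then
      match pvGrp th b r with
      | [] => [[a]]
      | c :: cs => (a :: c) :: cs
    else [a] :: pvGrp th b r

lemma pvGrp_head (th : Int) (a : Int × Int) (l : List (Int × Int)) :
    ∃ g gs, pvGrp th a l = (a :: g) :: gs := by
  induction l generalizing a with
  | nil => exact ⟨[], [], rfl⟩
  | cons b r ih =>
    simp only [pvGrp]
    split_ifs
    · obtain ⟨g, gs, hg⟩ := ih b
      rw [hg]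
      exact ⟨b :: g, gs, rfl⟩
    · exact ⟨[], pvGrp th b r, rfl⟩

lemma pvGetD_last (c : List (Int × Int)) (a : Int × Int) :
    PySem.List.pyGetD (c ++ [a]) (-1) (0, 0) = a := by
  simp [PySem.List.pyGetD, PySem.List.pyGet?, PySem.List.pyIdx?]

-- A's grouping loop computes pvGrp
lemma pvLoopA (th : Int) (l : List (Int × Int)) :
    ∀ (G : List (List (Int × Int))) (c : List (Int × Int)) (a : Int × Int),
      (fun r => r.1 ++ [r.2]) (List.foldl (pvStepA th) (G, c ++ [a]) l)
        = G ++ (match pvGrp th a l with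
                | [] => [c]
                | g :: gs => (c ++ g) :: gs) := by
  induction l with
  | nil => intro G c a; simp [pvGrp]
  | cons b r ih =>
    intro G c a
    simp only [List.foldl_cons, pvStepA, pvGetD_last, pvGrp]
    split_ifs with h
    · have := ih G (c ++ [a]) b
      simp only [List.append_assoc, List.cons_append, List.nil_append] at this ⊢
      rw [this]
      cases hg : pvGrp th b r with
      | nil => simp
      | cons g gs => simp
    · have := ih (G ++ [c ++ [a]]) [] b
      simp only [List.nil_append] at this
      rw [this]
      obtain ⟨g, gs, hg⟩ := pvGrp_head th b r
      rw [hg]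
      simp

lemma pvLoopA_snd_ne (th : Int) (l : List (Int × Int)) :
    ∀ st : List (List (Int × Int)) × List (Int × Int), st.2 ≠ [] →
      (List.foldl (pvStepA th) st l).2 ≠ [] := by
  induction l with
  | nil => intro st h; exact h
  | cons b r ih =>
    intro st h
    simp only [List.foldl_cons]
    apply ih
    simp only [pvStepA]
    split_ifs <;> simp

-- labeled columns, labels starting at j
def pvLab (j : Int) : List (List (Int × Int)) → List (Int × (Int × Int))
  | [] => []
  | g :: gs => g.map (fun t => (j, t)) ++ pvLab (j + 1) gs

-- B's labeling loop computes pvLab of pvGrp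
lemma pvLoopB (th : Int) (l : List (Int × Int)) :
    ∀ (L : List (Int × (Int × Int))) (j : Int) (a : Int × Int) (g : List (Int × Int))
      (gs : List (List (Int × Int))), pvGrp th a l = (a :: g) :: gs →
      (List.foldl (pvStepB th) (L, j, some a) l).1
        = L ++ g.map (fun t => (j, t)) ++ pvLab (j + 1) gs := by
  induction l with
  | nil =>
    intro L j a g gs h
    simp only [pvGrp] at h
    have hg : g = [] := by injection h with h1 _; injection h1 with _ h2; exact h2.symm
    have hgs : gs = [] := by injection h with _ h2; exact h2.symm
    subst hg; subst hgs; simp [pvLab]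
  | cons b r ih =>
    intro L j a g gs h
    simp only [List.foldl_cons, pvStepB]
    simp only [pvGrp] at h
    split_ifs at h with hc
    · obtain ⟨g', gs', hg⟩ := pvGrp_head th b r
      rw [hg] at h
      have hgg : g = b :: g' := by injection h with h1 _; injection h1 with _ h2; exact h2.symm
      have hgs : gs = gs' := by injection h with _ h2; exact h2.symm
      have hcol : ¬ |b.1 - a.1| > th := not_lt.mpr hc
      simp only [hcol, if_false]
      rw [ih (L ++ [(j, b)]) j b g' gs' hg]
      simp [hgg, hgs]
    · obtain ⟨g', gs', hg⟩ := pvGrp_head th b r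
      have hgg : g = [] := by injection h with h1 _; injection h1 with _ h2; exact h2.symm
      have hgs : gs = pvGrp th b r := by injection h with _ h2; exact h2.symm
      have hcol : |b.1 - a.1| > th := lt_of_not_ge hc
      simp only [hcol, if_true]
      rw [ih (L ++ [(j + 1, b)]) (j + 1) b g' gs' hg]
      simp [pvLab, hgg, hgs, hg]

-- insertBy commutes with an order-preserving relabeling
lemma pvInsertBy_map {α β : Type} (before : β → β → Bool) (before' : α → α → Bool)
    (f : α → β) (hf : ∀ a b, before (f a) (f b) = before' a b) (x : α) (ys : List α) :
    PySem.List.insertBy before (f x) (ys.map f) = (PySem.List.insertBy before' x ys).map f := by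
  induction ys with
  | nil => rfl
  | cons y t ih =>
    simp only [List.map_cons, PySem.List.insertBy, hf]
    split_ifs <;> simp_all

lemma pvFoldl_insertBy_map {α β : Type} (before : β → β → Bool) (before' : α → α → Bool)
    (f : α → β) (hf : ∀ a b, before (f a) (f b) = before' a b) (l : List α) :
    ∀ acc : List α,
      (l.map f).foldl (fun acc x => PySem.List.insertBy before x acc) (acc.map f)
        = (l.foldl (fun acc x => PySem.List.insertBy before' x acc) acc).map f := by
  induction l with
  | nil => intro acc; rfl
  | cons x t ih =>
    intro acc
    simp only [List.map_cons, List.foldl_cons, pvInsertBy_map before before' f hf]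
    exact ih _

lemma pvInsertBy_append {α : Type} (before : α → α → Bool) (x : α) (P Q : List α)
    (h : ∀ y ∈ P, before x y = false) :
    PySem.List.insertBy before x (P ++ Q) = P ++ PySem.List.insertBy before x Q := by
  induction P with
  | nil => rfl
  | cons p t ih =>
    simp only [List.cons_append, PySem.List.insertBy, h p List.mem_cons_self]
    simp only [Bool.false_eq_true, if_false, List.cons.injEq, true_and]
    exact ih fun y hy => h y (List.mem_cons_of_mem p hy)

lemma pvFoldl_ins_prefix {α : Type} (before : α → α → Bool) (P : List α) (N : List α)
    (h : ∀ x ∈ N, ∀ y ∈ P, before x y = false) :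
    ∀ acc : List α,
      N.foldl (fun a x => PySem.List.insertBy before x a) (P ++ acc)
        = P ++ N.foldl (fun a x => PySem.List.insertBy before x a) acc := by
  induction N with
  | nil => intro acc; rfl
  | cons x t ih =>
    intro acc
    simp only [List.foldl_cons]
    rw [pvInsertBy_append before x P acc (h x List.mem_cons_self)]
    exact ih (fun y hy => h y (List.mem_cons_of_mem x hy)) _

lemma pvLab_fst_ge (j : Int) (gs : List (List (Int × Int))) :
    ∀ p ∈ pvLab j gs, j ≤ p.1 := by
  induction gs generalizing j with
  | nil => simp [pvLab]
  | cons g t ih =>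
    intro p hp
    simp only [pvLab, List.mem_append, List.mem_map] at hp
    rcases hp with ⟨q, _, rfl⟩ | hp
    · exact le_refl j
    · exact le_trans (by omega) (ih (j + 1) p hp)

-- per-column y-sorted, labeled output
def pvLabSorted (j : Int) : List (List (Int × Int)) → List (Int × (Int × Int))
  | [] => []
  | g :: gs => (PySem.List.sorted g (fun t => t.2) false).map (fun t => (j, t))
      ++ pvLabSorted (j + 1) gs

-- the composite-key stable sort of a labeled concatenation sorts column by column
lemma pvSorted2_lab (gs : List (List (Int × Int))) :
    ∀ j : Int,
      PySem.List.sorted2 (pvLab j gs) (fun p => p.1) (fun p => p.2.2) false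
        = pvLabSorted j gs := by
  induction gs with
  | nil => intro j; rfl
  | cons g t ih =>
    intro j
    have hred : ∀ (L : List (Int × (Int × Int))),
        PySem.List.sorted2 L (fun p => p.1) (fun p => p.2.2) false
          = List.foldl (fun acc x => PySem.List.insertBy
              (fun a b => decide (a.1 < b.1) || (!decide (b.1 < a.1) && decide (a.2.2 < b.2.2)))
              x acc) [] L := fun L => rfl
    have hredg : ∀ (gl : List (Int × Int)),
        PySem.List.sorted gl (fun t => t.2) false
          = List.foldl (fun acc x => PySem.List.insertBy
              (fun a b => decide (a.2 < b.2)) x acc) [] gl := fun gl => rfl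
    rw [hred]
    simp only [pvLab, List.foldl_append]
    have h1 : (g.map (fun t => (j, t))).foldl
        (fun acc x => PySem.List.insertBy
          (fun a b => decide (a.1 < b.1) || (!decide (b.1 < a.1) && decide (a.2.2 < b.2.2))) x acc)
        (([] : List (Int × Int)).map (fun t => (j, t)))
        = ((g.foldl (fun acc x => PySem.List.insertBy
            (fun a b => decide (a.2 < b.2)) x acc) []).map (fun t => (j, t))) := by
      apply pvFoldl_insertBy_map
      intro a b
      simp
    simp only [List.map_nil] at h1
    rw [h1]
    have h2 := pvFoldl_ins_prefix
      (fun a b : Int × (Int × Int) =>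
        decide (a.1 < b.1) || (!decide (b.1 < a.1) && decide (a.2.2 < b.2.2)))
      ((g.foldl (fun acc x => PySem.List.insertBy (fun a b => decide (a.2 < b.2)) x acc) []).map
        (fun t => (j, t)))
      (pvLab (j + 1) t)
      (by
        intro x hx y hy
        have hxj : j + 1 ≤ x.1 := pvLab_fst_ge (j + 1) t x hx
        simp only [List.mem_map] at hy
        obtain ⟨q, _, rfl⟩ := hy
        simp [show ¬ (x.1 < j) by omega, show j < x.1 by omega])
      []
    simp only [List.append_nil] at h2
    rw [h2, ← hred, ih (j + 1)]
    simp [pvLabSorted, hredg]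

lemma pvMap_snd_labSorted (gs : List (List (Int × Int))) (j : Int) :
    (pvLabSorted j gs).map (fun p => p.2)
      = (gs.map (fun column => PySem.List.sorted column (fun t => t.2) false)).flatten := by
  induction gs generalizing j with
  | nil => rfl
  | cons g t ih =>
    simp only [pvLabSorted, List.map_append, List.map_map, List.map_cons, List.flatten_cons]
    rw [ih (j + 1)]
    simp

-- ===== VERDICT (by name: the statement is the Claim_ definition above) =====
theorem sort_texts_in_panel_spec : Claim_equal_sort_texts_in_panel := by
  intro texts th _
  unfold Spec_sort_texts_in_panel sort_texts_in_panel sort_texts_in_panel_alt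
  by_cases hts : texts = []
  · simp [hts]
  · simp only [hts, if_false]
    set s := PySem.List.sorted texts (fun t => t.1) true with hs
    have hsne : s ≠ [] := by
      rw [hs]; simpa [PySem.List.sorted_eq_nil_iff] using hts
    obtain ⟨a, rest, hsr⟩ : ∃ a rest, s = a :: rest := List.exists_cons_of_ne_nil hsne
    -- A side: turn the indexed loop into a fold over the tail
    have hA : (PySem.List.pyRange 1 (PySem.List.len s)).foldl
        (fun acc j => pvStepA th acc (PySem.List.pyGetD s j (0, 0)))
        ([], [PySem.List.pyGetD s 0 (0, 0)])
        = List.foldl (pvStepA th) ([], [a]) rest := by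
      rw [PySem.List.foldl_pyRange_pyGetD s (0, 0) (pvStepA th) _ (by norm_num)]
      simp [hsr, PySem.List.pyGetD, PySem.List.pyGet?, PySem.List.pyIdx?]
    rw [hA]
    set r := List.foldl (pvStepA th) ([], [a]) rest with hr
    have hr2 : r.2 ≠ [] := pvLoopA_snd_ne th rest ([], [a]) (by simp)
    have hgr : r.1 ++ [r.2] = pvGrp th a rest := by
      have := pvLoopA th rest [] [] a
      simp only [List.nil_append] at this
      rw [← hr] at this
      obtain ⟨g, gs, hg⟩ := pvGrp_head th a rest
      rw [hg] at this ⊢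
      simpa using this
    simp only [hr2, ne_eq, not_false_iff, if_true]
    -- B side: the labeling loop computes pvLab 0 (pvGrp th a rest)
    obtain ⟨g, gs, hg⟩ := pvGrp_head th a rest
    have hB : (s.foldl (pvStepB th) ([], 0, none)).1 = pvLab 0 (pvGrp th a rest) := by
      rw [hsr]
      simp only [List.foldl_cons, pvStepB]
      simp only [List.nil_append]
      rw [pvLoopB th rest [((0 : Int), a)] 0 a g gs hg]
      simp [hg, pvLab]
    rw [hB, pvSorted2_lab (pvGrp th a rest) 0, pvMap_snd_labSorted (pvGrp th a rest) 0, hgr]
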